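-- pv_equiv track=rewrite | github.com/YeLiu1110/Bioinformatics_1 | week2.py | ComputingFrequenciesWithMismatches
-- ===== SOURCE A (Python) =====
-- def PatternToNumber1(DNAsta):
--     stalst, indlst = ['A','C','G','T'], [0,1,2,3]
--     DNAstaindlst = []
--     for ind in DNAsta:
--         DNAstaindlst.append(indlst[stalst.index(ind)])
--     #import pdb;pdb.set_trace()
--     DNAstaindlst = [str(x) for x in DNAstaindlst]
--     strnum = ''.join(DNAstaindlst)
--     return int(strnum,4) #base on 4
--
-- def NumberToPattern(numbe, divvalue):
--     stalst, indlst = ['A', 'C', 'G', 'T'], [0, 1, 2, 3]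
--     numbe = int(numbe)
--     mid = []
--     while True:
--         if numbe == 0: break
--         numbe, rem = divmod(numbe, 4)
--         mid.append(rem)
--     if len(mid) < divvalue:
--         x=0
--         appendlst = []
--         for x in range(divvalue - len(mid)):
--             appendlst.append(0)
--             x=x+1
--     #import pdb;pdb.set_trace()
--         midtot = mid + appendlst
--     else:
--         midtot = mid
--     numstr = ''.join([stalst[indlst.index(x)] for x in midtot[::-1]])
--     return numstr
--
-- def HammingDistance(Seq1, Seq2):
--     if len(Seq1) != len(Seq2):
--         #import pdb;pdb.set_trace()
--         return
--     else:
--         mismatchcount = 0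
--         for i in range(0,len(Seq1)):
--             if Seq1[i] != Seq2[i]:
--                 mismatchcount =mismatchcount + 1
--         return mismatchcount
--
-- def Neighbors(Pattern,d):
--
--     def Suffix(Pattern):
--         return Pattern[1:]
--     if d == 0:
--         return [Pattern]
--     if len(Pattern) == 1:
--         return ['A','T','C','G']
--     Neighborhood = set()
--
--     #import pdb;pdb.set_trace()
--     SuffixNeighbors = Neighbors(Suffix(Pattern),d)
--     for str in SuffixNeighbors:
--         #import pdb;pdb.set_trace()
--         if HammingDistance(Suffix(Pattern),str) < int(d):
--             for x in ['A','T','C','G']: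
--                 Neighborhood.add('%s%s'%(x,str))
--             #import pdb;pdb.set_trace()
--
--         else:
--             Neighborhood.add('%s%s' % (Pattern[len(Pattern)-len(str)-1], str))
--     return Neighborhood
--
-- def ComputingFrequenciesWithMismatches(Genome,k,d):
--     FrequentPattern = set()
--     FrequencyDic = {i:0 for i in range(4**k)}
--     for i in range(len(Genome)-k):
--         Pattern = Genome[i:i+k]
--         Neighborhood = Neighbors(Pattern, d)
--         for kmer in Neighborhood:
--             j = PatternToNumber1(kmer)
--             FrequencyDic[j] = FrequencyDic[j] + 1
--     maxCount = max(FrequencyDic.values())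
--     for frekmer in FrequencyDic.keys():
--         if FrequencyDic[frekmer] == maxCount:
--             FrequentPattern.add(NumberToPattern(frekmer,k))
--
--     return FrequentPattern
-- ===== SOURCE B (Python) =====
-- def ComputingFrequenciesWithMismatches(Genome, k, d):
--     # Candidate enumeration: for every k-mer pattern count approximate occurrences
--     # directly via Hamming distance; no neighborhood generation, no pattern<->number
--     # round trips per window.
--     def num_to_pattern(num, k):
--         out = []
--         for _ in range(k):
--             num, r = divmod(num, 4)
--             out.append("ACGT"[r])
--         return ''.join(reversed(out))
--
--     def hamming(a, b):
--         return sum(1 for x, y in zip(a, b) if x != y)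
--
--     windows = [Genome[i:i + k] for i in range(len(Genome) - k)]
--     counts = []
--     for num in range(4 ** k):
--         pattern = num_to_pattern(num, k)
--         counts.append(sum(1 for w in windows if hamming(w, pattern) <= d))
--     m = max(counts)
--     return {num_to_pattern(num, k) for num in range(4 ** k) if counts[num] == m}
-- ===== Notes on version B (the rewrite author's own statement) =====
-- stated objective: alternative
-- what changed: Replaces per-window recursive Neighbors-set generation plus PatternToNumber1 round-trips with direct candidate enumeration: each of the 4**k candidate patterns is counted by scanning all windows with a plain Hamming-distance test; Neighbors and PatternToNumber1 are never used.
-- outside the precondition, e.g. on ComputingFrequenciesWithMismatches('', 0, 0): A returns {''}, B returns {''}; on ComputingFrequenciesWithMismatches('AXA', 2, 1): A returns {'AT', 'AC', 'AG', 'AA'}, B returns {'AT', 'AC', 'AG', 'AA'}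
import Mathlib
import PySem

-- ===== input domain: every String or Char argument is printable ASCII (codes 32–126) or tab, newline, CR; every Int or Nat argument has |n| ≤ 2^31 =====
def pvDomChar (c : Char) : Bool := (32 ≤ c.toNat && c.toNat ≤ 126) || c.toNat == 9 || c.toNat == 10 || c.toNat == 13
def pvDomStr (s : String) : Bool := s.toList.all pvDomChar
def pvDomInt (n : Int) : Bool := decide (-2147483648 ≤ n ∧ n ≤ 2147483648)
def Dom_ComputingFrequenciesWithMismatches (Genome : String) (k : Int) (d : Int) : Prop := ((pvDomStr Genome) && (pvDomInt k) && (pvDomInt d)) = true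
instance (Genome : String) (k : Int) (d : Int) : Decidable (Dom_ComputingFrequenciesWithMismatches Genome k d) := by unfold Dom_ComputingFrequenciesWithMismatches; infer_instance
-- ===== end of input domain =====

-- B replaces A's per-window Neighbors-set generation (+ PatternToNumber1 round trips) by direct
-- candidate enumeration with a plain Hamming test; a genuinely different algorithm of similar cost.

-- ===== PORT A =====

-- PatternToNumber1, on the character list of the Python string.
-- stalst.index(ind) raises ValueError for a char outside 'ACGT' — unreachable under Pre_ —,
-- totalized with .getD 0; ''.join(str(x) for x in digits) followed by int(strnum, 4) is ported as
-- the exact base-4 fold over the digit list (int('', 4) would raise ValueError: unreachable, k ≥ 1).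
def PatternToNumber1 (DNAsta : List Char) : Int :=
  let digits := DNAsta.map (fun c => (PySem.List.index? (['A','C','G','T'] : List Char) c).getD 0)
  digits.foldl (fun a x => 4 * a + Int.ofNat x) 0

-- the while/divmod loop of NumberToPattern (remainders, least-significant first)
def ntpLoop (numbe : Nat) : List Nat :=
  if h : numbe = 0 then [] else (numbe % 4) :: ntpLoop (numbe / 4)
decreasing_by exact Nat.div_lt_self (Nat.pos_of_ne_zero h) (by norm_num)

-- numbe ≥ 0 at every call site (dict keys 0..4**k-1), so divmod(numbe, 4) is Nat divmod: exact.
-- stalst[indlst.index(x)] is stalst[x] with x ∈ [0,4): ported as getD (default unreachable).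
def NumberToPattern (numbe : Int) (divvalue : Int) : String :=
  let mid := ntpLoop numbe.toNat
  let midtot := if (mid.length : Int) < divvalue
    then mid ++ List.replicate (divvalue - (mid.length : Int)).toNat 0
    else mid
  String.mk (midtot.reverse.map (fun x => (['A','C','G','T'] : List Char).getD x 'A'))

-- returns None (ported: none) when the lengths differ; Seq1[i]/Seq2[i] are in range for
-- i in range(len(Seq1)): ported as getD with an unreachable default.
def HammingDistanceA (Seq1 Seq2 : List Char) : Option Int :=
  if Seq1.length ≠ Seq2.length then none
  else some ((List.range Seq1.length).foldl
    (fun m i => if Seq1.getD i ' ' ≠ Seq2.getD i ' ' then m + 1 else m) (0 : Int))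

-- Neighbors. The Python returns a list in the two base cases and a set otherwise; evaluation order
-- over the set (hash order) never reaches the result (it only drives commuting dict increments and
-- set insertions), so every branch is represented as a PySem.Set.
-- On Pattern = '' with d ≠ 0 the Python recurses forever: unreachable under Pre_ (k ≥ 1).
-- HammingDistance(None-case) < int(d) would raise TypeError: unreachable (suffix-neighbor lengths match).
def NeighborsA (Pattern : List Char) (d : Int) : PySem.Set (List Char) :=
  if d = 0 then PySem.Set.ofList [Pattern]
  else if Pattern.length = 1 then PySem.Set.ofList [['A'], ['T'], ['C'], ['G']]
  else
    match Pattern with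
    | [] => PySem.Set.empty
    | p :: tl =>
      (NeighborsA tl d).foldl (fun acc s =>
        match HammingDistanceA tl s with
        | some m =>
          if m < d then
            (['A','T','C','G'] : List Char).foldl (fun a x => PySem.Set.add a (x :: s)) acc
          else
            PySem.Set.add acc
              (PySem.List.pyGetD (p :: tl) (((p :: tl).length : Int) - (s.length : Int) - 1) ' ' :: s)
        | none => acc) PySem.Set.empty

-- 4**k for k < 0 is a Python float and range() then raises TypeError: unreachable under Pre_ (k ≥ 1).
-- FrequencyDic[j] = FrequencyDic[j] + 1 would raise KeyError for a missing j: unreachable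
-- (j = PatternToNumber1(kmer) ∈ [0, 4**k) for the ACGT k-mers produced under Pre_).
-- max(FrequencyDic.values()) on the nonempty dict (4**k ≥ 4 under Pre_).
def ComputingFrequenciesWithMismatches (Genome : String) (k : Int) (d : Int) : List String :=
  let g := Genome.toList
  let dic0 : PySem.Dict Int Int :=
    PySem.Dict.ofList ((PySem.List.pyRange 0 ((4 : Int) ^ k.toNat)).map (fun i => (i, (0 : Int))))
  let dic := (PySem.List.pyRange 0 ((g.length : Int) - k)).foldl (fun D i =>
      let Pattern := PySem.List.slice g (some i) (some (i + k))
      let Neighborhood := NeighborsA Pattern d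
      Neighborhood.foldl (fun D kmer => D.modify (PatternToNumber1 kmer) 0 (· + 1)) D) dic0
  let maxCount := (PySem.List.max? dic.values id).getD 0
  dic.keys.foldl (fun (S : PySem.Set String) frekmer =>
      if dic.getD frekmer 0 = maxCount then PySem.Set.add S (NumberToPattern frekmer k) else S)
    PySem.Set.empty

-- ===== PORT B =====

-- the 'for _ in range(k): num, r = divmod(num, 4); out.append("ACGT"[r])' loop of Source B
def ntpAltLoop (num : Int) : Nat → List Char
  | 0 => []
  | t + 1 =>
    (['A','C','G','T'] : List Char).getD (PySem.Int.mod num 4).toNat 'A'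
      :: ntpAltLoop (PySem.Int.floordiv num 4) t

def NumberToPatternAlt (num : Int) (k : Int) : String :=
  String.mk (ntpAltLoop num k.toNat).reverse

-- sum(1 for x, y in zip(a, b) if x != y)
def hammingAlt (a b : List Char) : Int :=
  (((a.zip b).filter (fun p => p.1 != p.2)).length : Int)

def ComputingFrequenciesWithMismatches_alt (Genome : String) (k : Int) (d : Int) : List String :=
  let g := Genome.toList
  let windows := (PySem.List.pyRange 0 ((g.length : Int) - k)).map
    (fun i => PySem.List.slice g (some i) (some (i + k)))
  let counts := (PySem.List.pyRange 0 ((4 : Int) ^ k.toNat)).map (fun num =>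
    (windows.countP (fun w => decide (hammingAlt w (ntpAltLoop num k.toNat).reverse ≤ d)) : Int))
  let m := (PySem.List.max? counts id).getD 0
  (PySem.List.pyRange 0 ((4 : Int) ^ k.toNat)).foldl
    (fun (S : PySem.Set String) num =>
      if PySem.List.pyGetD counts num 0 = m then PySem.Set.add S (NumberToPatternAlt num k) else S)
    PySem.Set.empty

-- ===== PRECONDITION & SPEC =====
-- Pre_ restricts to the task's natural domain: k ≥ 1 and, whenever at least one window exists
-- (len(Genome) > k), d ≥ 0 and every Genome character a window can read (all but the last) in
-- 'ACGT'.  Outside it A raises (ValueError/TypeError/KeyError or unbounded recursion) or, for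
-- d < 0 / stray non-ACGT characters that never combine into a kmer / the k = 0 empty-genome
-- corner, returns accidental values of its helpers' base cases.
def Pre_ComputingFrequenciesWithMismatches (Genome : String) (k : Int) (d : Int) : Prop :=
  1 ≤ k ∧
    ((Genome.toList.length : Int) ≤ k ∨
      (0 ≤ d ∧
        (Genome.toList.dropLast.all (fun c => c == 'A' || c == 'C' || c == 'G' || c == 'T')) = true))
instance (Genome : String) (k : Int) (d : Int) :
    Decidable (Pre_ComputingFrequenciesWithMismatches Genome k d) := by
  unfold Pre_ComputingFrequenciesWithMismatches; infer_instance

def pvWitness_ComputingFrequenciesWithMismatches : String × Int × Int := ("ACGTA", 2, 1)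

def Spec_ComputingFrequenciesWithMismatches (Genome : String) (k : Int) (d : Int) (out : List String) : Prop := out = ComputingFrequenciesWithMismatches_alt Genome k d
instance (Genome : String) (k : Int) (d : Int) (out : List String) : Decidable (Spec_ComputingFrequenciesWithMismatches Genome k d out) := by unfold Spec_ComputingFrequenciesWithMismatches; infer_instance

-- ===== CLAIM (what is proved, stated in full; the proofs are below) =====
def Claim_equal_ComputingFrequenciesWithMismatches : Prop := ∀ (Genome : String) (k : Int) (d : Int), Dom_ComputingFrequenciesWithMismatches Genome k d → Pre_ComputingFrequenciesWithMismatches Genome k d → Spec_ComputingFrequenciesWithMismatches Genome k d (ComputingFrequenciesWithMismatches Genome k d)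

-- ===== LEMMAS AND PROOFS =====

-- canonical base-4 vocabulary used only by the proofs
def nth4 (x : Nat) : Char := (['A','C','G','T'] : List Char).getD x 'A'
def idx4 (c : Char) : Nat := (PySem.List.index? (['A','C','G','T'] : List Char) c).getD 0
def digitsLE : Nat → Nat → List Nat
  | _, 0 => []
  | j, t + 1 => j % 4 :: digitsLE (j / 4) t
def decodeP (j t : Nat) : List Char := (digitsLE j t).reverse.map nth4
def valLE : List Nat → Nat
  | [] => 0
  | x :: r => x + 4 * valLE r
def hamN (a b : List Char) : Nat := ((a.zip b).filter (fun p => p.1 != p.2)).length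
def isACGT (s : List Char) : Prop := ∀ c ∈ s, c ∈ (['A','C','G','T'] : List Char)

theorem length_digitsLE (t : Nat) : ∀ j, (digitsLE j t).length = t := by
  induction t with
  | zero => intro j; rfl
  | succ t ih => intro j; simp [digitsLE, ih]


theorem digitsLE_lt (t : Nat) : ∀ j, ∀ x ∈ digitsLE j t, x < 4 := by
  induction t with
  | zero => intro j x hx; simp [digitsLE] at hx
  | succ t ih =>
    intro j x hx
    simp only [digitsLE, List.mem_cons] at hx
    rcases hx with h | h
    · subst h; omega
    · exact ih _ _ h

theorem digitsLE_zero : ∀ t, digitsLE 0 t = List.replicate t 0 := by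
  intro t
  induction t with
  | zero => rfl
  | succ t ih => simp [digitsLE, ih, List.replicate_succ]

theorem valLE_digitsLE (t : Nat) : ∀ j, j < 4 ^ t → valLE (digitsLE j t) = j := by
  induction t with
  | zero => intro j h; interval_cases j; rfl
  | succ t ih =>
    intro j h
    have h4 : (4 : Nat) ^ (t + 1) = 4 * 4 ^ t := by ring
    have hdiv : j / 4 < 4 ^ t := by omega
    simp [digitsLE, valLE, ih _ hdiv]
    omega

theorem digitsLE_valLE : ∀ ds, (∀ x ∈ ds, x < 4) → digitsLE (valLE ds) ds.length = ds := by
  intro ds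
  induction ds with
  | nil => intro _; rfl
  | cons x r ih =>
    intro h
    have hx : x < 4 := h x (by simp)
    have h1 : (x + 4 * valLE r) % 4 = x := by omega
    have h2 : (x + 4 * valLE r) / 4 = valLE r := by omega
    simp [valLE, digitsLE, h1, h2, ih (fun y hy => h y (by simp [hy]))]

theorem valLE_lt : ∀ ds, (∀ x ∈ ds, x < 4) → valLE ds < 4 ^ ds.length := by
  intro ds
  induction ds with
  | nil => intro _; simp [valLE]
  | cons x r ih =>
    intro h
    have hx : x < 4 := h x (by simp)
    have := ih (fun y hy => h y (by simp [hy]))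
    simp only [valLE, List.length_cons, Nat.pow_succ]
    omega

theorem ntpLoop_pad (t : Nat) : ∀ j, j < 4 ^ t →
    (ntpLoop j).length ≤ t ∧
      ntpLoop j ++ List.replicate (t - (ntpLoop j).length) 0 = digitsLE j t := by
  induction t with
  | zero =>
    intro j h
    interval_cases j
    constructor
    · simp [ntpLoop]
    · simp [ntpLoop, digitsLE]
  | succ t ih =>
    intro j h
    by_cases hj : j = 0
    · subst hj
      rw [ntpLoop]
      simp [digitsLE_zero]
    · have h4 : (4 : Nat) ^ (t + 1) = 4 * 4 ^ t := by ring
      have hdiv : j / 4 < 4 ^ t := by omega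
      obtain ⟨hl, he⟩ := ih (j / 4) hdiv
      rw [ntpLoop, dif_neg hj]
      refine ⟨by simp; omega, ?_⟩
      simp only [List.length_cons, List.cons_append, digitsLE]
      congr 1
      have hs : t + 1 - ((ntpLoop (j / 4)).length + 1) = t - (ntpLoop (j / 4)).length := by omega
      rw [hs, he]

theorem NumberToPattern_eq_decode (k : Int) (j : Nat) (hk : 0 ≤ k) (hj : j < 4 ^ k.toNat) :
    NumberToPattern (j : Int) k = String.mk (decodeP j k.toNat) := by
  obtain ⟨hl, he⟩ := ntpLoop_pad k.toNat j hj
  simp only [NumberToPattern, decodeP, nth4, Int.toNat_natCast]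
  congr 1
  congr 1
  by_cases hlt : ((ntpLoop j).length : Int) < k
  · rw [if_pos hlt]
    have hq : (k - ((ntpLoop j).length : Int)).toNat = k.toNat - (ntpLoop j).length := by omega
    rw [hq, he]
  · rw [if_neg hlt]
    have hle : (ntpLoop j).length = k.toNat := by omega
    have hz : k.toNat - (ntpLoop j).length = 0 := by omega
    rw [hz, List.replicate_zero, List.append_nil] at he
    rw [he]

theorem ntpAltLoop_eq (t : Nat) : ∀ j : Nat, ntpAltLoop (j : Int) t = (digitsLE j t).map nth4 := by
  induction t with
  | zero => intro j; rfl
  | succ t ih =>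
    intro j
    have hmod : PySem.Int.mod (j : Int) 4 = ((j % 4 : Nat) : Int) := by
      rw [PySem.Int.mod_eq_emod_of_pos (by norm_num : (0:Int) < 4)]
      omega
    have hdiv : PySem.Int.floordiv (j : Int) 4 = ((j / 4 : Nat) : Int) := by
      rw [PySem.Int.floordiv_eq_ediv_of_pos (by norm_num : (0:Int) < 4)]
      omega
    simp only [ntpAltLoop, hmod, hdiv, Int.toNat_natCast, digitsLE, List.map]
    rw [ih]
    rfl

theorem NumberToPatternAlt_eq (k : Int) (j : Nat) :
    NumberToPatternAlt (j : Int) k = String.mk (decodeP j k.toNat) := by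
  unfold NumberToPatternAlt decodeP
  rw [ntpAltLoop_eq, List.map_reverse]

theorem nth4_mem (x : Nat) : nth4 x ∈ (['A','C','G','T'] : List Char) := by
  unfold nth4
  rcases x with _ | _ | _ | _ | x <;> simp [List.getD]

theorem idx4_nth4 {x : Nat} (h : x < 4) : idx4 (nth4 x) = x := by
  interval_cases x <;> decide

theorem nth4_idx4 {c : Char} (h : c ∈ (['A','C','G','T'] : List Char)) : nth4 (idx4 c) = c := by
  fin_cases h <;> decide

theorem idx4_lt {c : Char} (h : c ∈ (['A','C','G','T'] : List Char)) : idx4 c < 4 := by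
  fin_cases h <;> decide

theorem length_decodeP (j t : Nat) : (decodeP j t).length = t := by
  simp [decodeP, length_digitsLE]

theorem isACGT_decodeP (j t : Nat) : isACGT (decodeP j t) := by
  intro c hc
  simp only [decodeP, List.mem_map] at hc
  obtain ⟨x, _, rfl⟩ := hc
  exact nth4_mem x

theorem foldl_base4 (ds : List Nat) :
    ds.foldl (fun a x => 4 * a + Int.ofNat x) 0 = (valLE ds.reverse : Int) := by
  induction ds using List.reverseRecOn with
  | nil => rfl
  | append_singleton r x ih =>
    rw [List.foldl_append, ih]
    simp only [List.foldl_cons, List.foldl_nil, List.reverse_append, List.reverse_cons,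
      List.reverse_nil, List.nil_append, List.cons_append, valLE, Int.ofNat_eq_natCast]
    push_cast
    ring

theorem PTN1_eq_valLE (s : List Char) :
    PatternToNumber1 s = (valLE ((s.map idx4).reverse) : Int) := by
  unfold PatternToNumber1
  simp only []
  rw [foldl_base4]
  rfl

theorem PTN1_decodeP {j t : Nat} (h : j < 4 ^ t) :
    PatternToNumber1 (decodeP j t) = (j : Int) := by
  rw [PTN1_eq_valLE]
  have h1 : (decodeP j t).map idx4 = (digitsLE j t).reverse := by
    unfold decodeP
    rw [List.map_map]
    have h2 : ∀ x ∈ (digitsLE j t).reverse, (idx4 ∘ nth4) x = id x := fun x hx =>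
      idx4_nth4 (digitsLE_lt t j x (List.mem_reverse.1 hx))
    rw [List.map_congr_left h2, List.map_id]
  rw [h1, List.reverse_reverse, valLE_digitsLE t j h]

theorem PTN1_range {s : List Char} (h : isACGT s) :
    0 ≤ PatternToNumber1 s ∧ PatternToNumber1 s < ((4 ^ s.length : Nat) : Int) := by
  rw [PTN1_eq_valLE]
  have hd : ∀ x ∈ (s.map idx4).reverse, x < 4 := by
    intro x hx
    simp only [List.mem_reverse, List.mem_map] at hx
    obtain ⟨c, hc, rfl⟩ := hx
    exact idx4_lt (h c hc)
  have hv := valLE_lt _ hd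
  simp only [List.length_reverse, List.length_map] at hv
  exact ⟨by positivity, by exact_mod_cast hv⟩

theorem decode_PTN1 {s : List Char} (h : isACGT s) :
    decodeP (PatternToNumber1 s).toNat s.length = s := by
  rw [PTN1_eq_valLE, Int.toNat_natCast]
  unfold decodeP
  have hd : ∀ x ∈ (s.map idx4).reverse, x < 4 := by
    intro x hx
    simp only [List.mem_reverse, List.mem_map] at hx
    obtain ⟨c, hc, rfl⟩ := hx
    exact idx4_lt (h c hc)
  have hlen : ((s.map idx4).reverse).length = s.length := by simp
  rw [← hlen, digitsLE_valLE _ hd, List.reverse_reverse, List.map_map]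
  have h2 : ∀ c ∈ s, (nth4 ∘ idx4) c = id c := fun c hc => nth4_idx4 (h c hc)
  rw [List.map_congr_left h2, List.map_id]

theorem PTN1_eq_iff {s : List Char} {t j : Nat} (hA : isACGT s) (hl : s.length = t)
    (hj : j < 4 ^ t) : PatternToNumber1 s = (j : Int) ↔ s = decodeP j t := by
  constructor
  · intro h
    have h2 := decode_PTN1 hA
    rw [h, Int.toNat_natCast, hl] at h2
    exact h2.symm
  · intro h
    rw [h]
    exact PTN1_decodeP hj

-- hamming bridges
theorem ham_comm (a : List Char) : ∀ b, hamN a b = hamN b a := by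
  induction a with
  | nil => intro b; cases b <;> rfl
  | cons x a ih =>
    intro b
    cases b with
    | nil => rfl
    | cons y b =>
      simp only [hamN, List.zip_cons_cons, List.filter_cons]
      by_cases hxy : x = y
      · subst hxy
        simp only [bne_self_eq_false]
        have := ih b
        simp only [hamN] at this
        simp [this]
      · have h1 : (x != y) = true := by simp [hxy]
        have h2 : (y != x) = true := by simp [Ne.symm hxy]
        simp only [h1, h2, if_pos, List.length_cons]
        have := ih b
        simp only [hamN] at this
        omega

theorem ham_eq_zero_iff (a : List Char) : ∀ b, a.length = b.length → (hamN a b = 0 ↔ a = b) := by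
  induction a with
  | nil =>
    intro b hb
    cases b with
    | nil => simp [hamN]
    | cons y b => simp at hb
  | cons x a ih =>
    intro b hb
    cases b with
    | nil => simp at hb
    | cons y b =>
      simp only [List.length_cons] at hb
      simp only [hamN, List.zip_cons_cons, List.filter_cons]
      by_cases hxy : x = y
      · subst hxy
        simp only [bne_self_eq_false]
        have := ih b (by omega)
        simp only [hamN] at this
        simpa using this
      · have h1 : (x != y) = true := by simp [hxy]
        simp [h1, hxy]

theorem ham_self (a : List Char) : hamN a a = 0 := (ham_eq_zero_iff a a rfl).2 rfl

theorem ham_cons (c p : Char) (a b : List Char) :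
    hamN (c :: a) (p :: b) = (if c = p then 0 else 1) + hamN a b := by
  simp only [hamN, List.zip_cons_cons, List.filter_cons]
  by_cases h : c = p
  · subst h; simp
  · have h1 : (c != p) = true := by simp [h]
    simp [h1, h, Nat.add_comm]

theorem ham_le_length (a b : List Char) : hamN a b ≤ a.length := by
  unfold hamN
  calc ((a.zip b).filter (fun p => p.1 != p.2)).length
      ≤ (a.zip b).length := List.length_filter_le _ _
    _ ≤ a.length := by rw [List.length_zip]; omega

theorem countP_range_ham (a : List Char) : ∀ b : List Char, a.length = b.length →
    (List.range a.length).countP (fun i => decide (a.getD i ' ' ≠ b.getD i ' ')) = hamN a b := by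
  induction a with
  | nil => intro b hb; simp [hamN]
  | cons x a ih =>
    intro b hb
    cases b with
    | nil => simp at hb
    | cons y b =>
      simp only [List.length_cons] at hb
      rw [List.length_cons, List.range_succ_eq_map, List.countP_cons, List.countP_map]
      have h2 : (List.range a.length).countP
          ((fun i => decide ((x :: a).getD i ' ' ≠ (y :: b).getD i ' ')) ∘ (· + 1)) =
          (List.range a.length).countP (fun i => decide (a.getD i ' ' ≠ b.getD i ' ')) := by
        apply List.countP_congr
        intro i _
        simp [List.getD]
      rw [h2, ih b (by omega), ham_cons]
      by_cases hxy : x = y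
      · simp [hxy, List.getD]
      · simp [hxy, List.getD, Nat.add_comm]

theorem hammingA_eq {a b : List Char} (h : a.length = b.length) :
    HammingDistanceA a b = some ((hamN a b : Nat) : Int) := by
  unfold HammingDistanceA
  rw [if_neg (by omega)]
  rw [PySem.List.foldl_ite_add_one (fun i => a.getD i ' ' ≠ b.getD i ' ')]
  rw [countP_range_ham a b h]
  simp

theorem hammingAlt_eq (a b : List Char) : hammingAlt a b = (hamN a b : Int) := rfl

-- Neighbors: nodup and membership characterization
theorem set_update_of_subset {α : Type} [BEq α] [LawfulBEq α] (s : PySem.Set α) (xs : List α)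
    (h : ∀ x ∈ xs, x ∈ s) : PySem.Set.update s xs = s := by
  rw [PySem.Set.update_eq_append_filter]
  have hf : (PySem.Set.ofList xs).filter (fun y => !PySem.Set.contains s y) = [] := by
    rw [List.filter_eq_nil_iff]
    intro y hy
    have hmem : y ∈ xs := (PySem.Set.mem_ofList xs y).1 hy
    simp
    exact h y hmem
  rw [hf, List.append_nil]

theorem nodup_NeighborsA (P : List Char) (d : Int) : (NeighborsA P d).Nodup := by
  induction P with
  | nil =>
    rw [NeighborsA]
    split
    · exact List.nodup_singleton _
    · split
      · decide
      · exact List.nodup_nil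
  | cons p tl ih =>
    rw [NeighborsA]
    split
    · exact List.nodup_singleton _
    · split
      · decide
      · have key : ∀ (l : List (List Char)) (acc : PySem.Set (List Char)), acc.Nodup →
            (l.foldl (fun acc s =>
              match HammingDistanceA tl s with
              | some m =>
                if m < d then
                  (['A','T','C','G'] : List Char).foldl (fun a x => PySem.Set.add a (x :: s)) acc
                else
                  PySem.Set.add acc
                    (PySem.List.pyGetD (p :: tl) (((p :: tl).length : Int) - (s.length : Int) - 1) ' ' :: s)
              | none => acc) acc).Nodup := by
          intro l
          induction l with
          | nil => intro acc hacc; exact hacc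
          | cons s l ihl =>
            intro acc hacc
            rw [List.foldl_cons]
            apply ihl
            cases HammingDistanceA tl s with
            | none => exact hacc
            | some m =>
              simp only
              split
              · rw [← PySem.Set.update_map_eq_foldl_add]
                exact PySem.Set.nodup_update _ _ hacc
              · exact PySem.Set.nodup_add _ _ hacc
        exact key _ _ List.nodup_nil

theorem mem_NeighborsA (P : List Char) : ∀ d : Int, 0 ≤ d → isACGT P → P ≠ [] →
    ∀ s, s ∈ NeighborsA P d ↔
      (s.length = P.length ∧ isACGT s ∧ (hamN s P : Int) ≤ d) := by
  induction P with
  | nil => intro d _ _ h; exact absurd rfl h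
  | cons p tl ih =>
    intro d hd hACGT _ s
    rw [NeighborsA]
    by_cases hd0 : d = 0
    · subst hd0
      rw [if_pos rfl]
      constructor
      · intro hs
        have hsp : s = p :: tl := by
          have := (PySem.Set.mem_ofList [p :: tl] s).1 hs
          simpa using this
        subst hsp
        exact ⟨rfl, hACGT, by simp [ham_self]⟩
      · rintro ⟨hl, _, hham⟩
        have h0 : hamN s (p :: tl) = 0 := by omega
        have hsp : s = p :: tl := (ham_eq_zero_iff s (p :: tl) hl).1 h0
        subst hsp
        simp [PySem.Set.mem_ofList]
    · rw [if_neg hd0]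
      have hd1 : 1 ≤ d := by omega
      by_cases hlen1 : (p :: tl).length = 1
      · rw [if_pos hlen1]
        have htl : tl = [] := by
          cases tl
          · rfl
          · simp at hlen1
        subst htl
        constructor
        · intro hs
          have hm := (PySem.Set.mem_ofList [['A'], ['T'], ['C'], ['G']] s).1 hs
          simp only [List.mem_cons, List.not_mem_nil, or_false] at hm
          rcases hm with rfl | rfl | rfl | rfl <;>
            refine ⟨rfl, by intro c hc; simp at hc; simp [hc], ?_⟩
          · have hb := ham_le_length ['A'] [p]; simp at hb; omega
          · have hb := ham_le_length ['T'] [p]; simp at hb; omega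
          · have hb := ham_le_length ['C'] [p]; simp at hb; omega
          · have hb := ham_le_length ['G'] [p]; simp at hb; omega
        · rintro ⟨hl, hA, _⟩
          cases s with
          | nil => simp at hl
          | cons c s' =>
            have hs' : s' = [] := by
              cases s'
              · rfl
              · simp at hl
            subst hs'
            have hc := hA c (by simp)
            rw [PySem.Set.mem_ofList]
            fin_cases hc <;> simp
      · rw [if_neg hlen1]
        have htl : tl ≠ [] := by
          cases tl
          · simp at hlen1
          · simp
        have htlACGT : isACGT tl := fun c hc => hACGT c (by simp [hc])
        have ihtl := ih d hd htlACGT htl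
        have hcongr : ((NeighborsA tl d).foldl (fun acc s =>
              match HammingDistanceA tl s with
              | some m =>
                if m < d then
                  (['A','T','C','G'] : List Char).foldl (fun a x => PySem.Set.add a (x :: s)) acc
                else
                  PySem.Set.add acc
                    (PySem.List.pyGetD (p :: tl) (((p :: tl).length : Int) - (s.length : Int) - 1) ' ' :: s)
              | none => acc) PySem.Set.empty) =
            ((NeighborsA tl d).foldl (fun acc t =>
              if (hamN t tl : Int) < d then
                (['A','T','C','G'] : List Char).foldl (fun a x => PySem.Set.add a (x :: t)) acc
              else PySem.Set.add acc (p :: t)) PySem.Set.empty) := by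
          apply PySem.List.foldl_congr_mem
          intro acc t ht
          have hlt : t.length = tl.length := ((ihtl t).1 ht).1
          rw [hammingA_eq (show tl.length = t.length from hlt.symm)]
          simp only
          rw [ham_comm tl t]
          congr 1
          have hidx : ((p :: tl).length : Int) - (t.length : Int) - 1 = 0 := by
            simp [hlt]
          rw [hidx, PySem.List.pyGetD_zero_cons]
        rw [hcongr]
        have hmem : ∀ (l : List (List Char)) (acc : PySem.Set (List Char)) (s : List Char),
            s ∈ l.foldl (fun acc t =>
              if (hamN t tl : Int) < d then
                (['A','T','C','G'] : List Char).foldl (fun a x => PySem.Set.add a (x :: t)) acc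
              else PySem.Set.add acc (p :: t)) acc ↔
            s ∈ acc ∨ ∃ t ∈ l, (if (hamN t tl : Int) < d
              then ∃ x ∈ (['A','T','C','G'] : List Char), s = x :: t
              else s = p :: t) := by
          intro l
          induction l with
          | nil => intro acc s; simp
          | cons t l ihl =>
            intro acc s
            rw [List.foldl_cons, ihl]
            by_cases hc : (hamN t tl : Int) < d
            · rw [if_pos hc, PySem.Set.mem_foldl_add]
              constructor
              · rintro (⟨h | ⟨x, hx, rfl⟩⟩ | ⟨t', ht', hp⟩)
                · exact Or.inl h
                · exact Or.inr ⟨t, by simp, by rw [if_pos hc]; exact ⟨x, hx, rfl⟩⟩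
                · exact Or.inr ⟨t', by simp [ht'], hp⟩
              · rintro (h | ⟨t', ht', hp⟩)
                · exact Or.inl (Or.inl h)
                · rcases List.mem_cons.1 ht' with rfl | ht'
                  · rw [if_pos hc] at hp
                    exact Or.inl (Or.inr hp)
                  · exact Or.inr ⟨t', ht', hp⟩
            · rw [if_neg hc, PySem.Set.mem_add]
              constructor
              · rintro (⟨h | rfl⟩ | ⟨t', ht', hp⟩)
                · exact Or.inl h
                · exact Or.inr ⟨t, by simp, by rw [if_neg hc]⟩
                · exact Or.inr ⟨t', by simp [ht'], hp⟩
              · rintro (h | ⟨t', ht', hp⟩)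
                · exact Or.inl (Or.inl h)
                · rcases List.mem_cons.1 ht' with rfl | ht'
                  · rw [if_neg hc] at hp
                    exact Or.inl (Or.inr hp)
                  · exact Or.inr ⟨t', ht', hp⟩
        rw [hmem]
        simp only [PySem.Set.empty, List.not_mem_nil, false_or]
        constructor
        · rintro ⟨t, ht, hp⟩
          obtain ⟨hlt, hAt, hht⟩ := (ihtl t).1 ht
          by_cases hc : (hamN t tl : Int) < d
          · rw [if_pos hc] at hp
            obtain ⟨x, hx, rfl⟩ := hp
            refine ⟨by simp [hlt], ?_, ?_⟩
            · intro c hc'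
              rcases List.mem_cons.1 hc' with rfl | hc'
              · fin_cases hx <;> simp
              · exact hAt c hc'
            · rw [ham_cons]
              split <;> push_cast <;> push_cast at hc <;> omega
          · rw [if_neg hc] at hp
            subst hp
            refine ⟨by simp [hlt], ?_, ?_⟩
            · intro c hc'
              rcases List.mem_cons.1 hc' with rfl | hc'
              · exact hACGT c (by simp)
              · exact hAt c hc'
            · rw [ham_cons, if_pos rfl]
              push_cast
              push_cast at hht
              omega
        · rintro ⟨hl, hA, hham⟩
          cases s with
          | nil => simp at hl
          | cons c t =>
            simp only [List.length_cons, Nat.add_right_cancel_iff] at hl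
            rw [ham_cons] at hham
            have hAt : isACGT t := fun c' hc' => hA c' (by simp [hc'])
            have hhamt : (hamN t tl : Int) ≤ d := by
              split at hham <;> push_cast at hham ⊢ <;> omega
            have htmem : t ∈ NeighborsA tl d := (ihtl t).2 ⟨hl, hAt, hhamt⟩
            refine ⟨t, htmem, ?_⟩
            by_cases hc : (hamN t tl : Int) < d
            · rw [if_pos hc]
              have hcA := hA c (by simp)
              refine ⟨c, ?_, rfl⟩
              fin_cases hcA <;> simp
            · rw [if_neg hc]
              have hcp : c = p := by
                by_contra hne
                rw [if_neg hne] at hham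
                push_cast at hham
                omega
              rw [hcp]

-- the seeded frequency dict
theorem items_dic0 (N : Nat) :
    (PySem.Dict.ofList ((PySem.List.pyRange 0 (N : Int)).map (fun i => (i, (0 : Int))))).items =
      (PySem.List.pyRange 0 (N : Int)).map (fun i => (i, (0 : Int))) := by
  show (PySem.Dict.empty.update _).items = _
  unfold PySem.Dict.update
  rw [PySem.Dict.items_foldl_insert_fresh _ Prod.fst Prod.snd _
    (by intro a _; rfl)
    (by rw [List.map_map]
        have h : (Prod.fst ∘ fun i => ((i : Int), (0 : Int))) = id := by funext i; rfl
        rw [h, List.map_id]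
        exact PySem.List.nodup_pyRange_one 0 _)]
  simp [PySem.Dict.empty, Function.comp_def]

theorem getD_dic0 (N : Nat) (j : Int) :
    (PySem.Dict.ofList ((PySem.List.pyRange 0 (N : Int)).map (fun i => (i, (0 : Int))))).getD j 0
      = 0 := by
  rcases h : (PySem.Dict.ofList
      ((PySem.List.pyRange 0 (N : Int)).map (fun i => (i, (0 : Int))))).get? j with _ | v
  · exact PySem.Dict.getD_of_get?_eq_none _ _ h
  · have hv := PySem.Dict.mem_items_of_get?_eq_some _ h
    rw [items_dic0] at hv
    simp only [List.mem_map] at hv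
    obtain ⟨i, _, hiv⟩ := hv
    have hv0 : v = 0 := by
      have := congrArg Prod.snd hiv
      simpa using this.symm
    subst hv0
    exact PySem.Dict.getD_of_get?_eq_some _ _ h

theorem keys_dic0 (N : Nat) :
    (PySem.Dict.ofList ((PySem.List.pyRange 0 (N : Int)).map (fun i => (i, (0 : Int))))).keys
      = PySem.List.pyRange 0 (N : Int) := by
  unfold PySem.Dict.keys
  rw [items_dic0, List.map_map]
  have h : ((fun x => x.1) ∘ fun i => ((i : Int), (0 : Int))) = id := by funext i; rfl
  rw [h, List.map_id]

-- the dict value at key j after the whole A loop, as a sum of neighborhood counts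
theorem getD_after_loop (d : Int) (l : List Int) (wf : Int → List Char) :
    ∀ (D : PySem.Dict Int Int) (j : Int),
      (l.foldl (fun D i =>
        (NeighborsA (wf i) d).foldl (fun D kmer => D.modify (PatternToNumber1 kmer) 0 (· + 1)) D)
        D).getD j 0
      = D.getD j 0 + ((l.map (fun i => (((NeighborsA (wf i) d).map PatternToNumber1).count j : Int))).sum) := by
  induction l with
  | nil => intro D j; simp
  | cons i l ih =>
    intro D j
    rw [List.foldl_cons, ih]
    have hstep : ((NeighborsA (wf i) d).foldl
        (fun D kmer => D.modify (PatternToNumber1 kmer) 0 (· + 1)) D).getD j 0 =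
        D.getD j 0 + (((NeighborsA (wf i) d).map PatternToNumber1).count j : Int) := by
      rw [← List.foldl_map (f := PatternToNumber1)
        (g := fun (D : PySem.Dict Int Int) x => D.modify x 0 (· + 1))]
      exact PySem.Dict.getD_foldl_modify_add_one _ _ _
    rw [hstep]
    simp only [List.map_cons, List.sum_cons]
    ring

theorem keys_after_loop (d : Int) (l : List Int) (wf : Int → List Char) (N : Nat)
    (hkm : ∀ i ∈ l, ∀ kmer ∈ NeighborsA (wf i) d,
      0 ≤ PatternToNumber1 kmer ∧ PatternToNumber1 kmer < (N : Int)) :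
    ∀ (D : PySem.Dict Int Int), D.keys = PySem.List.pyRange 0 (N : Int) →
      (l.foldl (fun D i =>
        (NeighborsA (wf i) d).foldl (fun D kmer => D.modify (PatternToNumber1 kmer) 0 (· + 1)) D)
        D).keys = PySem.List.pyRange 0 (N : Int) := by
  induction l with
  | nil => intro D hD; simpa using hD
  | cons i l ih =>
    intro D hD
    rw [List.foldl_cons]
    apply ih (fun i' hi' => hkm i' (by simp [hi']))
    rw [PySem.Dict.keys_foldl_modify_key _ PatternToNumber1 0 (fun _ _ => (· + 1)) D, hD]
    apply set_update_of_subset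
    intro x hx
    simp only [List.mem_map] at hx
    obtain ⟨kmer, hk, rfl⟩ := hx
    have := hkm i (by simp) kmer hk
    rw [PySem.List.mem_pyRange_one]
    exact this

-- count of a key in the image of a Nodup neighborhood of ACGT k-mers
theorem count_map_PTN1 {nb : List (List Char)} (hnd : nb.Nodup) {t : Nat}
    (hall : ∀ s ∈ nb, isACGT s ∧ s.length = t) {j : Nat} (hj : j < 4 ^ t) :
    (nb.map PatternToNumber1).count ((j : Nat) : Int)
      = if decodeP j t ∈ nb then 1 else 0 := by
  rw [List.count_eq_countP, List.countP_map]
  have hc : (nb.countP ((fun x => x == ((j : Nat) : Int)) ∘ PatternToNumber1)) =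
      nb.countP (fun s => s == decodeP j t) := by
    apply List.countP_congr
    intro s hs
    obtain ⟨hA, hl⟩ := hall s hs
    simp only [Function.comp_apply, beq_iff_eq]
    exact PTN1_eq_iff hA hl hj
  rw [hc, ← List.count_eq_countP]
  by_cases hm : decodeP j t ∈ nb
  · rw [if_pos hm]
    exact List.count_eq_one_of_mem hnd hm
  · rw [if_neg hm]
    exact List.count_eq_zero_of_not_mem hm

-- ===== VERDICT (by name: the statement is the Claim_ definition above) =====
theorem ComputingFrequenciesWithMismatches_spec : Claim_equal_ComputingFrequenciesWithMismatches := by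
  intro Genome k d _ hPre
  obtain ⟨hk, hrest⟩ := hPre
  unfold Spec_ComputingFrequenciesWithMismatches
  unfold ComputingFrequenciesWithMismatches ComputingFrequenciesWithMismatches_alt
  simp only []
  set g := Genome.toList with hg
  set K := k.toNat with hK
  have hkK : (K : Int) = k := by omega
  set N := 4 ^ K with hN
  have hNc : ((4 : Int) ^ K) = ((N : Nat) : Int) := by rw [hN]; push_cast; ring
  set l := PySem.List.pyRange 0 ((g.length : Int) - k) with hl
  set wf : Int → List Char := fun i => PySem.List.slice g (some i) (some (i + k)) with hwf
  -- whenever a window exists, d ≥ 0 and the readable characters are ACGT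
  have hside : ∀ i ∈ l, 0 ≤ d ∧ ∀ c ∈ g.dropLast, c ∈ (['A','C','G','T'] : List Char) := by
    intro i hi
    rw [hl, PySem.List.mem_pyRange_one] at hi
    rcases hrest with hlen | ⟨hd, hcharsB⟩
    · omega
    · refine ⟨hd, ?_⟩
      intro c hc
      have hb := List.all_eq_true.mp hcharsB c hc
      simp only [Bool.or_eq_true, beq_iff_eq] at hb
      simp only [List.mem_cons, List.not_mem_nil, or_false]
      tauto
  -- window facts
  have hwin : ∀ i ∈ l, (wf i).length = K ∧ isACGT (wf i) ∧ wf i ≠ [] := by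
    intro i hi
    obtain ⟨hdi, hchars⟩ := hside i hi
    rw [hl, PySem.List.mem_pyRange_one] at hi
    obtain ⟨hi0, hi1⟩ := hi
    have hik : i + k ≤ (g.length : Int) := by omega
    have hsl : wf i = (g.drop i.toNat).take ((i + k).toNat - i.toNat) := by
      rw [hwf]
      exact PySem.List.slice_of_nonneg g hi0 (by omega) (by omega) hik
    have htn : (i + k).toNat - i.toNat = K := by omega
    rw [htn] at hsl
    have hlen : (wf i).length = K := by
      rw [hsl, List.length_take, List.length_drop]
      have : i.toNat + K ≤ g.length := by omega
      omega
    refine ⟨hlen, ?_, ?_⟩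
    · intro c hc
      have hKle : K ≤ (g.length - 1) - i.toNat := by omega
      have hdt : List.drop i.toNat (List.take (g.length - 1) g) =
          List.take ((g.length - 1) - i.toNat) (List.drop i.toNat g) := List.drop_take
      have hsub : wf i = List.take K (List.drop i.toNat (List.take (g.length - 1) g)) := by
        rw [hsl, hdt, List.take_take, Nat.min_eq_left hKle]
      rw [hsub] at hc
      have hc2 := List.mem_of_mem_take hc
      have hc3 := List.mem_of_mem_drop hc2
      rw [← List.dropLast_eq_take] at hc3
      exact hchars c hc3
    · intro hnil
      rw [hnil] at hlen
      simp at hlen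
      omega
  -- every produced key lies in [0, N)
  have hkm : ∀ i ∈ l, ∀ kmer ∈ NeighborsA (wf i) d,
      0 ≤ PatternToNumber1 kmer ∧ PatternToNumber1 kmer < ((N : Nat) : Int) := by
    intro i hi kmer hkm'
    have hdi := (hside i hi).1
    obtain ⟨hlen, hACGT, hne⟩ := hwin i hi
    have hmem := (mem_NeighborsA (wf i) d hdi hACGT hne kmer).1 hkm'
    obtain ⟨hl', hA', _⟩ := hmem
    have := PTN1_range hA'
    rw [hl', hlen] at this
    exact this
  -- the dict after the loop
  set dic := l.foldl (fun D i =>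
      (NeighborsA (wf i) d).foldl (fun D kmer => D.modify (PatternToNumber1 kmer) 0 (· + 1)) D)
    (PySem.Dict.ofList ((PySem.List.pyRange 0 ((4:Int) ^ K)).map (fun i => (i, (0 : Int))))) with hdic
  have hkeys : dic.keys = PySem.List.pyRange 0 ((N : Nat) : Int) := by
    rw [hdic]
    apply keys_after_loop d l wf N hkm
    rw [hNc]
    exact keys_dic0 N
  -- per-key value of the dict = B's count
  set cnt : Int → Int := fun num =>
    ((l.map wf).countP (fun w => decide (hammingAlt w (ntpAltLoop num K).reverse ≤ d)) : Int)
    with hcnt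
  have hgetD : ∀ j ∈ PySem.List.pyRange 0 ((N : Nat) : Int), dic.getD j 0 = cnt j := by
    intro j hj
    rw [PySem.List.mem_pyRange_one] at hj
    obtain ⟨hj0, hj1⟩ := hj
    have hjn : j = ((j.toNat : Nat) : Int) := by omega
    have hjlt : j.toNat < N := by omega
    rw [hdic, getD_after_loop]
    rw [hNc] at *
    rw [getD_dic0 N j, zero_add]
    have hterm : ∀ i ∈ l, (((NeighborsA (wf i) d).map PatternToNumber1).count j : Int) =
        if decide ((hamN (wf i) (decodeP j.toNat K) : Int) ≤ d) = true then (1:Int) else 0 := by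
      intro i hi
      have hdi := (hside i hi).1
      obtain ⟨hlen, hACGT, hne⟩ := hwin i hi
      have hallwin : ∀ s ∈ NeighborsA (wf i) d, isACGT s ∧ s.length = K := by
        intro s hs
        have := (mem_NeighborsA (wf i) d hdi hACGT hne s).1 hs
        exact ⟨this.2.1, by rw [this.1, hlen]⟩
      rw [hjn, count_map_PTN1 (nodup_NeighborsA _ _) hallwin hjlt]
      simp only [Int.toNat_natCast]
      have hiff : decodeP j.toNat K ∈ NeighborsA (wf i) d ↔
          ((hamN (wf i) (decodeP j.toNat K) : Int) ≤ d) := by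
        rw [mem_NeighborsA (wf i) d hdi hACGT hne]
        constructor
        · intro h; rw [← ham_comm]; exact h.2.2
        · intro h
          exact ⟨by rw [length_decodeP, hlen], isACGT_decodeP _ _, by rw [ham_comm]; exact h⟩
      by_cases hmm : decodeP j.toNat K ∈ NeighborsA (wf i) d
      · simp [hmm, hiff.1 hmm]
      · have hno : ¬ ((hamN (wf i) (decodeP j.toNat K) : Int) ≤ d) := fun hcon => hmm (hiff.2 hcon)
        simp [hmm, hno]
    rw [List.map_congr_left hterm]
    rw [PySem.List.sum_map_ite_one_zero (fun i => decide ((hamN (wf i) (decodeP j.toNat K) : Int) ≤ d)) l]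
    rw [hcnt]
    simp only [List.countP_map]
    congr 1
    apply List.countP_congr
    intro i hi
    have hpat : (ntpAltLoop j K).reverse = decodeP j.toNat K := by
      have hj2 : ntpAltLoop j K = (digitsLE j.toNat K).map nth4 := by
        rw [hjn]; exact ntpAltLoop_eq K j.toNat
      rw [hj2, decodeP, List.map_reverse]
    simp only [Function.comp_apply, hpat, hammingAlt_eq]
  -- values list = counts list
  have hvalues : dic.values = (PySem.List.pyRange 0 ((4:Int) ^ K)).map cnt := by
    have hnd : dic.keys.Nodup := by rw [hkeys]; exact PySem.List.nodup_pyRange_one 0 _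
    rw [PySem.Dict.values_eq_map_keys dic hnd 0, hkeys, hNc]
    exact List.map_congr_left hgetD
  rw [hvalues, hkeys, ← hNc]
  -- final folds agree
  apply PySem.List.foldl_congr_mem
  intro acc fk hfk
  have hfk' := hfk
  rw [PySem.List.mem_pyRange_one] at hfk'
  obtain ⟨hfk0, hfk1⟩ := hfk'
  have hfkn : fk = ((fk.toNat : Nat) : Int) := by omega
  have hfklt : fk.toNat < N := by
    rw [hNc] at hfk1
    omega
  have hgd : dic.getD fk 0 =
      PySem.List.pyGetD ((PySem.List.pyRange 0 ((4:Int) ^ K)).map cnt) fk 0 := by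
    rw [PySem.List.pyGetD_map_pyRange_of_nonneg cnt _ fk 0 hfk0 hfk1]
    apply hgetD
    rw [PySem.List.mem_pyRange_one]
    refine ⟨hfk0, ?_⟩
    rw [← hNc]
    exact hfk1
  rw [hgd]
  have hpat : NumberToPattern fk k = NumberToPatternAlt fk k := by
    rw [hfkn, NumberToPattern_eq_decode k fk.toNat (by omega) (by rw [← hK]; exact hfklt),
      NumberToPatternAlt_eq]
  rw [hpat]
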